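-- pv_equiv track=rewrite | github.com/anonymousaur/sigmod2022_submission | continuous/gen_workload.py | find_range_end
-- ===== SOURCE A (Python) =====
-- def find_range_end(cumuls, startix, target_bounds):
--     left = startix
--     right = len(cumuls)-1
--     base_count = cumuls[startix-1] if startix > 0 else 0
--     c = cumuls[startix] - base_count
--     while left < right:
--         mid = int((left + right)/2)
--         c = cumuls[mid] - base_count
--         if c < target_bounds[0]:
--             left = mid+1
--         elif c > target_bounds[1]:
--             right = mid
--         else:
--             # We return an inclusive range
--             return mid, c
--     return left, cumuls[left] - base_count
-- ===== SOURCE B (Python) =====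
-- def find_range_end(cumuls, startix, target_bounds):
--     base = cumuls[startix - 1] if startix > 0 else 0
--     # Shift the target bounds once by base and search raw cumulative values,
--     # recursing on (left, gap) with gap = right - left instead of a (left, right) loop.
--     lo = target_bounds[0] + base
--     hi = target_bounds[1] + base
--
--     def go(left, gap):
--         if gap == 0:
--             return left, cumuls[left] - base
--         mid = left + gap // 2
--         v = cumuls[mid]
--         if v < lo:
--             return go(mid + 1, gap - gap // 2 - 1)
--         if v > hi:
--             return go(left, gap // 2)
--         return mid, v - base
--
--     return go(startix, len(cumuls) - 1 - startix)
-- ===== Notes on version B (the rewrite author's own statement) =====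
-- stated objective: alternative
-- what changed: Replaces A's (left, right) while-loop that subtracts base_count from every probed prefix sum with a recursive search on (left, gap) over raw cumulative values against once-shifted bounds (same midpoint sequence and early return via mid = left + gap//2), dropping A's dead pre-loop read of cumuls[startix].
-- outside the precondition, e.g. on find_range_end([1, 2, 3, 4, 5], -5, (0, 1)): A returns (0, 1), B returns (-5, 1); on find_range_end([1, 2, 3], -3, (-10, -5)): A does not finish within the time limit, B returns (-3, 1); on find_range_end([5, 10], 5, (0, 1)): A raises IndexError, B raises IndexError
import Mathlib
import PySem

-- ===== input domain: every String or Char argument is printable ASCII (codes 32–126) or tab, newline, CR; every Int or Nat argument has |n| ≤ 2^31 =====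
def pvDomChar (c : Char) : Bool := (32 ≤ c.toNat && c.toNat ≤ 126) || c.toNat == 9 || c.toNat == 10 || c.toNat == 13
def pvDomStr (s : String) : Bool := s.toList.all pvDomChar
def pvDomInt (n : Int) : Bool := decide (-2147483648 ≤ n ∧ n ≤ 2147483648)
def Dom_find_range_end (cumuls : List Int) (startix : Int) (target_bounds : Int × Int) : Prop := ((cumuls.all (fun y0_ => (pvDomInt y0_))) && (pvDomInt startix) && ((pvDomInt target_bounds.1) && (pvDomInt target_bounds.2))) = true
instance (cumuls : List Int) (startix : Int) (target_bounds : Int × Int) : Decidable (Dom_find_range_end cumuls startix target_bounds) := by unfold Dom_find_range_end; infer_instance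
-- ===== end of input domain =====

-- B shifts the target bounds by base_count once and binary-searches the raw cumulative values,
-- recursing on (left, gap) with a shrinking Nat gap instead of A's (left, right) while-loop
-- (alternative decomposition, same cost).

-- ===== PORT A =====
-- A's while-loop as fuel recursion over the same state (left, right).  Under Pre_ the gap
-- right-left strictly shrinks each iteration, so fuel (right-left).toNat suffices and the
-- fuel-0 fallback is exactly the loop's exit value (left, cumuls[left] - base_count).
-- int((left+right)/2) is truncating division here (|left+right| ≤ 2^32, so the float is exact): Int.tdiv.
def pvLoopA (cumuls : List Int) (base : Int) (tb : Int × Int) : Nat → Int → Int → Int × Int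
  | 0, left, _right => (left, PySem.List.pyGetD cumuls left 0 - base)
  | fuel+1, left, right =>
    if left < right then
      let mid := (left + right).tdiv 2
      let c := PySem.List.pyGetD cumuls mid 0 - base
      if c < tb.1 then pvLoopA cumuls base tb fuel (mid + 1) right
      else if c > tb.2 then pvLoopA cumuls base tb fuel left mid
      else (mid, c)
    else (left, PySem.List.pyGetD cumuls left 0 - base)

def find_range_end (cumuls : List Int) (startix : Int) (target_bounds : Int × Int) : Int × Int :=
  let left := startix
  let right := (cumuls.length : Int) - 1
  let base_count := if startix > 0 then PySem.List.pyGetD cumuls (startix - 1) 0 else 0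
  let _c := PySem.List.pyGetD cumuls startix 0 - base_count   -- A's dead pre-loop read of cumuls[startix]
  pvLoopA cumuls base_count target_bounds ((right - left).toNat) left right

-- ===== PORT B =====
-- Source B's go(left, gap): well-founded recursion on the Nat gap (mid = left + gap // 2; both
-- recursive calls strictly shrink gap).  Indices are Nat: faithful under Pre_, which
-- guarantees 0 ≤ startix < len(cumuls), so left and gap are nonnegative throughout.
def pvGoB (cumuls : List Int) (base lo hi : Int) (left gap : Nat) : Int × Int :=
  if h : gap = 0 then ((left : Int), PySem.List.pyGetD cumuls (left : Int) 0 - base)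
  else
    let mid := left + gap / 2
    let v := PySem.List.pyGetD cumuls (mid : Int) 0
    if v < lo then pvGoB cumuls base lo hi (mid + 1) (gap - gap / 2 - 1)
    else if v > hi then pvGoB cumuls base lo hi left (gap / 2)
    else ((mid : Int), v - base)
termination_by gap
decreasing_by all_goals omega

def find_range_end_alt (cumuls : List Int) (startix : Int) (target_bounds : Int × Int) : Int × Int :=
  let base := if startix > 0 then PySem.List.pyGetD cumuls (startix - 1) 0 else 0
  let lo := target_bounds.1 + base
  let hi := target_bounds.2 + base
  pvGoB cumuls base lo hi startix.toNat ((cumuls.length : Int) - 1 - startix).toNat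

-- ===== PRECONDITION & SPEC =====
-- Pre_ excludes startix ≥ len or startix < -len (Python A raises IndexError) and negative
-- in-range startix, where A's behaviour rests on accidental negative-index wraparound and the
-- truncating midpoint can make A's loop diverge (e.g. cumuls=[1,2,3], startix=-3, bounds=(-10,-5)).
def Pre_find_range_end (cumuls : List Int) (startix : Int) (target_bounds : Int × Int) : Prop :=
  0 ≤ startix ∧ startix < (cumuls.length : Int)
instance (cumuls : List Int) (startix : Int) (target_bounds : Int × Int) : Decidable (Pre_find_range_end cumuls startix target_bounds) := by unfold Pre_find_range_end; infer_instance
def pvWitness_find_range_end : List Int × Int × (Int × Int) := ([1, 3, 6, 10], 1, (2, 5))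

def Spec_find_range_end (cumuls : List Int) (startix : Int) (target_bounds : Int × Int) (out : Int × Int) : Prop := out = find_range_end_alt cumuls startix target_bounds
instance (cumuls : List Int) (startix : Int) (target_bounds : Int × Int) (out : Int × Int) : Decidable (Spec_find_range_end cumuls startix target_bounds out) := by unfold Spec_find_range_end; infer_instance

-- ===== CLAIM (what is proved, stated in full; the proofs are below) =====
def Claim_equal_find_range_end : Prop := ∀ (cumuls : List Int) (startix : Int) (target_bounds : Int × Int), Dom_find_range_end cumuls startix target_bounds → Pre_find_range_end cumuls startix target_bounds → Spec_find_range_end cumuls startix target_bounds (find_range_end cumuls startix target_bounds)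

-- ===== LEMMAS AND PROOFS =====
-- truncating and floor division agree on a nonnegative numerator
theorem pv_tdiv2 (a : Int) (h : 0 ≤ a) : a.tdiv 2 = a / 2 := by
  rw [Int.tdiv_eq_ediv]; simp [h]

-- A's loop on (left, right) with enough fuel computes B's recursion on (left.toNat, (right-left).toNat):
-- each step both probe the same midpoint (tdiv = Nat floor division on the nonnegative indices) and
-- A's comparison of cumuls[mid] - base with tb equals B's comparison of cumuls[mid] with tb shifted by base.
theorem pvLoopA_eq_goB (cumuls : List Int) (base : Int) (tb : Int × Int) :
    ∀ (fuel : Nat) (left right : Int), 0 ≤ left → left ≤ right → (right - left).toNat ≤ fuel →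
      pvLoopA cumuls base tb fuel left right =
        pvGoB cumuls base (tb.1 + base) (tb.2 + base) left.toNat (right - left).toNat := by
  intro fuel
  induction fuel with
  | zero =>
    intro l r hl hlr hfuel
    have hgap : (r - l).toNat = 0 := by omega
    rw [pvGoB]
    simp [pvLoopA, hgap, Int.toNat_of_nonneg hl]
  | succ n ih =>
    intro l r hl hlr hfuel
    rw [pvGoB]
    by_cases h : l < r
    · have hgap : ¬ (r - l).toNat = 0 := by omega
      simp only [pvLoopA, if_pos h, dif_neg hgap]
      have htd : (l + r).tdiv 2 = (l + r) / 2 := pv_tdiv2 _ (by omega)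
      have hmid : ((l.toNat + (r - l).toNat / 2 : Nat) : Int) = (l + r).tdiv 2 := by
        rw [htd]; omega
      have hmb : l ≤ (l + r).tdiv 2 ∧ (l + r).tdiv 2 < r := by
        rw [htd]; omega
      rw [hmid]
      set mid := (l + r).tdiv 2 with hmiddef
      set v := PySem.List.pyGetD cumuls mid 0 with hv
      by_cases h1 : v - base < tb.1
      · rw [if_pos h1, if_pos (by omega : v < tb.1 + base)]
        have e1 : (mid + 1).toNat = l.toNat + (r - l).toNat / 2 + 1 := by
          rw [← hmid]; omega
        have e2 : (r - (mid + 1)).toNat = (r - l).toNat - (r - l).toNat / 2 - 1 := by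
          rw [← hmid]; omega
        rw [ih (mid + 1) r (by omega) (by omega) (by rw [← hmid]; omega), e1, e2]
      · rw [if_neg h1, if_neg (by omega : ¬ v < tb.1 + base)]
        by_cases h2 : v - base > tb.2
        · rw [if_pos h2, if_pos (by omega : v > tb.2 + base)]
          have e2 : (mid - l).toNat = (r - l).toNat / 2 := by
            rw [← hmid]; omega
          rw [ih l mid hl (by omega) (by rw [← hmid]; omega), e2]
        · rw [if_neg h2, if_neg (by omega : ¬ v > tb.2 + base)]
    · have hgap : (r - l).toNat = 0 := by omega
      simp [pvLoopA, h, hgap, Int.toNat_of_nonneg hl]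

-- ===== VERDICT (by name: the statement is the Claim_ definition above) =====
theorem find_range_end_spec : Claim_equal_find_range_end := by
  intro cumuls startix tb _ hpre
  obtain ⟨h0, hlen⟩ := hpre
  unfold Spec_find_range_end find_range_end find_range_end_alt
  simp only []
  have hle : startix ≤ (cumuls.length : Int) - 1 := by omega
  rw [pvLoopA_eq_goB cumuls _ tb _ startix _ h0 hle (le_refl _)]
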